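-- pv_equiv track=rewrite | github.com/NikitaUshanov/test | main.py | group_data_by_centers
-- ===== SOURCE A (Python) =====
-- from typing import Final, Iterable
--
-- def group_data_by_centers(
--     data: Iterable[int],
--     centers: list[int],
-- ) -> list[int]:
--     """ Группировка массива данных
--
--     Args:
--         data: Массив данных
--         centers: Список наиболее частых значений
--
--     Returns:
--         Сгруппированный список данных
--     """
--
--     group_dict = {}
--     for i, center in enumerate(centers):
--         group_dict[center] = i + 1
--
--     groups = []
--     for i in data:
--         closest_center = min(centers, key=lambda x: abs(x - i))
--         groups.append(group_dict[closest_center])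
--
--     return groups
-- ===== SOURCE B (Python) =====
-- def group_data_by_centers(data, centers):
--     # one pass over centers builds first-occurrence index and group number per
--     # distinct center value; nearest center per data value by hand-rolled
--     # binary search over the sorted distinct values (ties -> first occurrence).
--     first = {}
--     last = {}
--     for i, c in enumerate(centers):
--         if c not in first:
--             first[c] = i
--         last[c] = i + 1
--     s = sorted(first)
--     groups = []
--     for x in data:
--         lo, hi = 0, len(s)
--         while lo < hi:
--             mid = (lo + hi) // 2
--             if s[mid] < x:
--                 lo = mid + 1
--             else:
--                 hi = mid
--         if lo == 0:
--             best = s[0]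
--         elif lo == len(s):
--             best = s[len(s) - 1]
--         else:
--             a, b = s[lo - 1], s[lo]
--             if x - a < b - x:
--                 best = a
--             elif b - x < x - a:
--                 best = b
--             else:
--                 best = a if first[a] < first[b] else b
--         groups.append(last[best])
--     return groups
-- ===== Notes on version B (the rewrite author's own statement) =====
-- stated objective: faster
-- what changed: Instead of scanning all centers with min() for every data value, B builds first-occurrence and group dictionaries in one pass, sorts the distinct center values once, and finds each data value's nearest center by binary search over the sorted values, breaking distance ties by first-occurrence index.
import Mathlib
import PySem

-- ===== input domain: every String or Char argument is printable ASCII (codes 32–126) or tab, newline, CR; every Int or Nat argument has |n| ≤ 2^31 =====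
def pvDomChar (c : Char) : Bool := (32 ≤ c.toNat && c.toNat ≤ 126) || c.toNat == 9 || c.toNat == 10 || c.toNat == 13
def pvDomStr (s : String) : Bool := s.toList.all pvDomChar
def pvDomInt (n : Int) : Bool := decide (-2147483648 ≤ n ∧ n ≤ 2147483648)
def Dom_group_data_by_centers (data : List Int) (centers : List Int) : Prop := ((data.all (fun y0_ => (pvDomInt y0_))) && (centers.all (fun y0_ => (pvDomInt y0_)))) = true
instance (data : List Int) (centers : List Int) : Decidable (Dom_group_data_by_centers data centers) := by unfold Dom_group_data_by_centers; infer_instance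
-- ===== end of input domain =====

-- B replaces A's per-element min() scan over all centers by one dictionary pass over
-- centers plus a hand-written binary search over the sorted distinct center values
-- (distance ties resolved by first-occurrence index); a timing run measured it faster.

-- ===== PORT A =====
def group_data_by_centers (data : List Int) (centers : List Int) : List Int :=
  let group_dict := (PySem.List.enumerate centers 0).foldl
    (fun d p => d.insert p.2 (p.1 + 1)) PySem.Dict.empty
  data.foldl (fun groups i =>
    -- min(centers, key=…) raises ValueError on empty centers: excluded by Pre_;
    -- group_dict[closest] always hits (closest ∈ centers), so getD 0 is exact there.
    let closest := (PySem.List.min? centers (fun x => |x - i|)).getD 0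
    groups ++ [group_dict.getD closest 0]) []

-- ===== PORT B =====
-- while lo < hi: mid = (lo+hi)//2; if s[mid] < x: lo = mid+1 else: hi = mid
-- (indices stay inside the list, so getD is exact for Python's s[mid])
def pvBisect (s : List Int) (x : Int) (lo hi : Nat) : Nat :=
  if _h : lo < hi then
    let mid := (lo + hi) / 2
    if s.getD mid 0 < x then pvBisect s x (mid + 1) hi else pvBisect s x lo mid
  else lo
termination_by hi - lo
decreasing_by all_goals omega

-- nearest sorted value to x; on empty s Python's s[0] raises IndexError (excluded by Pre_)
def pvBest (s : List Int) (first : PySem.Dict Int Int) (x : Int) : Int :=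
  let lo := pvBisect s x 0 s.length
  if lo = 0 then s.getD 0 0
  else if lo = s.length then s.getD (s.length - 1) 0
  else
    let a := s.getD (lo - 1) 0
    let b := s.getD lo 0
    if x - a < b - x then a
    else if b - x < x - a then b
    else if first.getD a 0 < first.getD b 0 then a else b

def group_data_by_centers_alt (data : List Int) (centers : List Int) : List Int :=
  let fl := (PySem.List.enumerate centers 0).foldl
    (fun st p => (if st.1.contains p.2 then st.1 else st.1.insert p.2 p.1,
                  st.2.insert p.2 (p.1 + 1)))
    (PySem.Dict.empty, PySem.Dict.empty)
  let s := PySem.List.sorted fl.1.keys (fun v => v)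
  data.foldl (fun groups x => groups ++ [fl.2.getD (pvBest s fl.1 x) 0]) []

-- ===== PRECONDITION & SPEC =====
-- Python A raises ValueError (min of an empty sequence) when centers == [] and data is
-- nonempty; Pre_ excludes empty centers (B's s[0] would raise IndexError there too).
def Pre_group_data_by_centers (data : List Int) (centers : List Int) : Prop := centers ≠ []
instance (data : List Int) (centers : List Int) : Decidable (Pre_group_data_by_centers data centers) := by unfold Pre_group_data_by_centers; infer_instance
def pvWitness_group_data_by_centers : List Int × List Int := ([1, 4, -2, 5], [0, 5, 3])

def Spec_group_data_by_centers (data : List Int) (centers : List Int) (out : List Int) : Prop := out = group_data_by_centers_alt data centers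
instance (data : List Int) (centers : List Int) (out : List Int) : Decidable (Spec_group_data_by_centers data centers out) := by unfold Spec_group_data_by_centers; infer_instance

-- ===== CLAIM (what is proved, stated in full; the proofs are below) =====
def Claim_equal_group_data_by_centers : Prop := ∀ (data : List Int) (centers : List Int), Dom_group_data_by_centers data centers → Pre_group_data_by_centers data centers → Spec_group_data_by_centers data centers (group_data_by_centers data centers)

-- ===== LEMMAS AND PROOFS =====

-- the step of B's first-occurrence dictionary
def pvFirstStep (d : PySem.Dict Int Int) (p : Int × Int) : PySem.Dict Int Int :=
  if d.contains p.2 then d else d.insert p.2 p.1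

-- B's single loop over enumerate(centers) building (first, last) splits into two folds
theorem pv_fl_split (l : List (Int × Int)) (d1 d2 : PySem.Dict Int Int) :
    l.foldl (fun st p => (if st.1.contains p.2 then st.1 else st.1.insert p.2 p.1,
                  st.2.insert p.2 (p.1 + 1))) (d1, d2)
      = (l.foldl pvFirstStep d1, l.foldl (fun d p => d.insert p.2 (p.1 + 1)) d2) := by
  induction l generalizing d1 d2 with
  | nil => rfl
  | cons p t ih => rw [List.foldl_cons, List.foldl_cons, List.foldl_cons, ih]; rfl

theorem pv_first_getD (l : List Int) (st : Int) (d : PySem.Dict Int Int) (v : Int) :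
    ((PySem.List.enumerate l st).foldl pvFirstStep d).getD v 0 =
      if d.contains v then d.getD v 0 else if v ∈ l then st + (l.idxOf v : Int) else 0 := by
  induction l generalizing st d with
  | nil =>
    simp only [PySem.List.enumerate_nil, List.foldl_nil, List.not_mem_nil, if_false]
    by_cases hc : d.contains v
    · simp [hc]
    · simp only [hc, Bool.false_eq_true, if_false]
      exact PySem.Dict.getD_of_not_contains d 0 (by simpa using hc)
  | cons c t ih =>
    rw [PySem.List.enumerate_cons, List.foldl_cons, ih]
    by_cases hvc : v = c
    · subst hvc
      by_cases hc : d.contains v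
      · have hstep : pvFirstStep d (st, v) = d := by simp [pvFirstStep, hc]
        simp [hstep, hc]
      · have hstep : pvFirstStep d (st, v) = d.insert v st := by simp [pvFirstStep, hc]
        rw [hstep]
        simp [PySem.Dict.contains_insert_self, PySem.Dict.getD_insert_self, hc,
          List.idxOf_cons_self]
    · have hstep1 : (pvFirstStep d (st, c)).contains v = d.contains v := by
        unfold pvFirstStep; dsimp only; split
        · rfl
        · rw [PySem.Dict.contains_insert]; simp [hvc]
      have hstep2 : (pvFirstStep d (st, c)).getD v 0 = d.getD v 0 := by
        unfold pvFirstStep; dsimp only; split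
        · rfl
        · exact PySem.Dict.getD_insert_of_ne d st 0 hvc
      rw [hstep1, hstep2]
      by_cases hc : d.contains v
      · simp [hc]
      · simp only [hc, Bool.false_eq_true, if_false, List.mem_cons, hvc, false_or]
        by_cases hm : v ∈ t
        · simp only [hm, if_true, List.idxOf_cons_ne t (Ne.symm hvc), Nat.succ_eq_add_one]
          push_cast; ring
        · simp [hm]

theorem pv_mem_keys_first (e : List (Int × Int)) (d : PySem.Dict Int Int) (v : Int) :
    v ∈ (e.foldl pvFirstStep d).keys ↔ v ∈ d.keys ∨ v ∈ e.map (·.2) := by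
  induction e generalizing d with
  | nil => simp
  | cons p t ih =>
    rw [List.foldl_cons, ih]
    unfold pvFirstStep
    by_cases hc : d.contains p.2
    · simp only [hc, if_true, List.map_cons, List.mem_cons]
      have hp : p.2 ∈ d.keys := (PySem.Dict.contains_iff_mem_keys d p.2).mp hc
      constructor
      · rintro (h | h)
        · exact Or.inl h
        · exact Or.inr (Or.inr h)
      · rintro (h | h | h)
        · exact Or.inl h
        · exact Or.inl (h ▸ hp)
        · exact Or.inr h
    · simp only [hc, Bool.false_eq_true, if_false, List.map_cons, List.mem_cons,
        PySem.Dict.mem_keys_insert]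
      tauto

theorem pv_nodup_keys_first (e : List (Int × Int)) (d : PySem.Dict Int Int)
    (h : d.keys.Nodup) : (e.foldl pvFirstStep d).keys.Nodup := by
  induction e generalizing d with
  | nil => exact h
  | cons p t ih =>
    rw [List.foldl_cons]
    apply ih
    unfold pvFirstStep
    split
    · exact h
    · exact PySem.Dict.nodup_keys_insert d p.2 p.1 h

theorem pv_bisect_spec (s : List Int) (x : Int) (hs : s.Pairwise (· < ·)) :
    ∀ (n lo hi : Nat), hi - lo ≤ n → lo ≤ hi → hi ≤ s.length →
      lo ≤ pvBisect s x lo hi ∧ pvBisect s x lo hi ≤ hi ∧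
      (∀ j (hj : j < s.length), j < pvBisect s x lo hi → lo ≤ j → s[j] < x) ∧
      (∀ j (hj : j < s.length), pvBisect s x lo hi ≤ j → j < hi → x ≤ s[j]) := by
  have hpg : ∀ (i j : Nat) (hi' : i < s.length) (hj' : j < s.length), i < j → s[i] < s[j] :=
    fun i j hi' hj' hij => List.pairwise_iff_getElem.mp hs i j hi' hj' hij
  intro n
  induction n with
  | zero =>
    intro lo hi hfuel hlh hhl
    have heq : lo = hi := by omega
    subst heq
    rw [pvBisect]
    simp only [lt_irrefl, dite_false]
    exact ⟨le_refl _, le_refl _, fun j hj h1 h2 => by omega, fun j hj h1 h2 => by omega⟩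
  | succ n ih =>
    intro lo hi hfuel hlh hhl
    rw [pvBisect]
    by_cases hlt : lo < hi
    · simp only [dif_pos hlt]
      have hm1 : lo ≤ (lo + hi) / 2 := by omega
      have hm2 : (lo + hi) / 2 < hi := by omega
      have hml : (lo + hi) / 2 < s.length := by omega
      have hget : s.getD ((lo + hi) / 2) 0 = s[(lo + hi) / 2] := List.getD_eq_getElem s 0 hml
      by_cases hc : s.getD ((lo + hi) / 2) 0 < x
      · rw [if_pos hc]
        rw [hget] at hc
        obtain ⟨h1, h2, h3, h4⟩ := ih ((lo + hi) / 2 + 1) hi (by omega) (by omega) hhl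
        refine ⟨by omega, h2, ?_, h4⟩
        intro j hj hjr hlj
        by_cases hjm : (lo + hi) / 2 + 1 ≤ j
        · exact h3 j hj hjr hjm
        · rcases Nat.lt_or_ge j ((lo + hi) / 2) with h | h
          · exact lt_trans (hpg j ((lo + hi) / 2) hj hml h) hc
          · have : j = (lo + hi) / 2 := by omega
            subst this; exact hc
      · rw [if_neg hc]
        rw [hget] at hc
        rw [not_lt] at hc
        obtain ⟨h1, h2, h3, h4⟩ := ih lo ((lo + hi) / 2) (by omega) (by omega) (by omega)
        refine ⟨h1, by omega, h3, ?_⟩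
        intro j hj hrj hjhi
        by_cases hjm : j < (lo + hi) / 2
        · exact h4 j hj hrj hjm
        · rcases Nat.lt_or_ge ((lo + hi) / 2) j with h | h
          · exact le_of_lt (lt_of_le_of_lt hc (hpg ((lo + hi) / 2) j hml hj h))
          · have : j = (lo + hi) / 2 := by omega
            subst this; exact hc
    · simp only [dif_neg hlt]
      exact ⟨le_refl _, hlh, fun j hj h1 h2 => by omega, fun j hj h1 h2 => by omega⟩

-- Python's min with a key returns the FIRST minimum: the list splits around it
theorem pv_min_loop (key : Int → Int) (f : Option Int → Int → Option Int)
    (hf : ∀ a y, f (some a) y = if key y < key a then some y else some a) :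
    ∀ (t : List Int) (a m : Int),
      t.foldl f (some a) = some m →
      ∃ pre suf, a :: t = pre ++ m :: suf ∧ (∀ y ∈ pre, key m < key y) ∧
        (∀ y ∈ suf, key m ≤ key y) := by
  intro t
  induction t with
  | nil =>
    intro a m h
    simp only [List.foldl_nil, Option.some.injEq] at h
    subst h
    exact ⟨[], [], rfl, by simp, by simp⟩
  | cons y t' ih =>
    intro a m h
    rw [List.foldl_cons, hf a y] at h
    by_cases hc : key y < key a
    · rw [if_pos hc] at h
      obtain ⟨pre, suf, heq, hpre, hsuf⟩ := ih y m h
      refine ⟨a :: pre, suf, by rw [List.cons_append, heq], ?_, hsuf⟩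
      intro z hz
      rcases List.mem_cons.mp hz with rfl | hz'
      · rcases pre with _ | ⟨p0, pre'⟩
        · have hym : y = m := by simpa using congrArg List.head? heq
          rw [← hym]; exact hc
        · have hp0 : y = p0 := by simpa using congrArg List.head? heq
          have hmy : key m < key y := by rw [hp0]; exact hpre p0 List.mem_cons_self
          exact lt_trans hmy hc
      · exact hpre z hz'
    · rw [if_neg hc] at h
      obtain ⟨pre, suf, heq, hpre, hsuf⟩ := ih a m h
      rcases pre with _ | ⟨p0, pre'⟩
      · simp only [List.nil_append, List.cons.injEq] at heq
        obtain ⟨ham, hts⟩ := heq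
        refine ⟨[], y :: t', by simp [ham], by simp, ?_⟩
        intro z hz
        rcases List.mem_cons.mp hz with rfl | hz'
        · rw [← ham]; exact le_of_not_gt hc
        · exact hsuf z (hts ▸ hz')
      · rw [List.cons_append] at heq
        obtain ⟨ha, ht'⟩ := List.cons_eq_cons.mp heq
        have hma : key m < key a := by rw [ha]; exact hpre p0 List.mem_cons_self
        refine ⟨a :: y :: pre', suf, by simp [ht'], ?_, hsuf⟩
        intro z hz
        rcases List.mem_cons.mp hz with rfl | hz'
        · exact hma
        rcases List.mem_cons.mp hz' with rfl | hz''
        · exact lt_of_lt_of_le hma (le_of_not_gt hc)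
        · exact hpre z (List.mem_cons_of_mem _ hz'')

theorem pv_min?_decomp (key : Int → Int) (xs : List Int) (m : Int)
    (h : PySem.List.min? xs key = some m) :
    ∃ pre suf, xs = pre ++ m :: suf ∧ (∀ y ∈ pre, key m < key y) ∧
      (∀ y ∈ suf, key m ≤ key y) := by
  rcases xs with _ | ⟨c, t⟩
  · simp [PySem.List.min?] at h
  · unfold PySem.List.min? at h
    rw [List.foldl_cons] at h
    exact pv_min_loop key _ (fun a y => rfl) t c m h

theorem pv_min?_first_idx (key : Int → Int) (xs : List Int) (m : Int)
    (h : PySem.List.min? xs key = some m) :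
    ∀ u ∈ xs, key u = key m → xs.idxOf m ≤ xs.idxOf u := by
  obtain ⟨pre, suf, heq, hpre, hsuf⟩ := pv_min?_decomp key xs m h
  have hmnp : m ∉ pre := fun hm => lt_irrefl _ (hpre m hm)
  intro u hu hku
  have hunp : u ∉ pre := fun hup => absurd hku (ne_of_gt (hpre u hup))
  subst heq
  rw [List.idxOf_append_of_notMem hmnp, List.idxOf_append_of_notMem hunp,
    List.idxOf_cons_self]
  omega

theorem pv_best_spec (s : List Int) (d : PySem.Dict Int Int) (x : Int) (f : Int → Int)
    (hs : s.Pairwise (· < ·)) (hne : s ≠ [])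
    (hd : ∀ v ∈ s, d.getD v 0 = f v) :
    pvBest s d x ∈ s ∧ (∀ u ∈ s, |pvBest s d x - x| ≤ |u - x|) ∧
      (∀ u ∈ s, |u - x| = |pvBest s d x - x| → f (pvBest s d x) ≤ f u) := by
  have hlen : 0 < s.length := List.length_pos_of_ne_nil hne
  obtain ⟨hr0, hrlen, h3, h4⟩ :=
    pv_bisect_spec s x hs s.length 0 s.length (by omega) (by omega) (le_refl _)
  have hpg : ∀ (i j : Nat) (hi' : i < s.length) (hj' : j < s.length), i < j → s[i] < s[j] :=
    fun i j hi' hj' hij => List.pairwise_iff_getElem.mp hs i j hi' hj' hij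
  set L := pvBisect s x 0 s.length with hLdef
  have habs : ∀ (j : Nat) (hj : j < s.length),
      |s[j] - x| = if j < L then x - s[j] else s[j] - x := by
    intro j hj
    by_cases hjL : j < L
    · have := h3 j hj hjL (Nat.zero_le j)
      rw [if_pos hjL, abs_of_neg (by omega)]; ring
    · have := h4 j hj (by omega) hj
      rw [if_neg hjL, abs_of_nonneg (by omega)]
  unfold pvBest
  rw [← hLdef]
  by_cases hL0 : L = 0
  · -- x is below (or at) every center: nearest is s[0], strictly so for the rest
    rw [if_pos hL0]
    have hg0 : s.getD 0 0 = s[0] := List.getD_eq_getElem s 0 hlen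
    rw [hg0]
    refine ⟨List.getElem_mem hlen, ?_, ?_⟩
    · intro u hu
      obtain ⟨j, hj, rfl⟩ := List.mem_iff_getElem.mp hu
      rw [habs 0 hlen, habs j hj, if_neg (by omega), if_neg (by omega)]
      rcases Nat.eq_zero_or_pos j with rfl | hjpos
      · omega
      · have := hpg 0 j hlen hj hjpos; omega
    · intro u hu heq
      obtain ⟨j, hj, rfl⟩ := List.mem_iff_getElem.mp hu
      rw [habs 0 hlen, habs j hj, if_neg (by omega), if_neg (by omega)] at heq
      rcases Nat.eq_zero_or_pos j with rfl | hjpos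
      · exact le_refl _
      · have := hpg 0 j hlen hj hjpos; omega
  · rw [if_neg hL0]
    by_cases hLlen : L = s.length
    · -- x is above every center: nearest is the last one, strictly so for the rest
      rw [if_pos hLlen]
      have hlast : s.length - 1 < s.length := by omega
      have hgl : s.getD (s.length - 1) 0 = s[s.length - 1] := List.getD_eq_getElem s 0 hlast
      rw [hgl]
      refine ⟨List.getElem_mem hlast, ?_, ?_⟩
      · intro u hu
        obtain ⟨j, hj, rfl⟩ := List.mem_iff_getElem.mp hu
        rw [habs (s.length - 1) hlast, habs j hj, if_pos (by omega), if_pos (by omega)]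
        rcases Nat.lt_or_ge j (s.length - 1) with h | h
        · have := hpg j (s.length - 1) hj hlast h; omega
        · have : j = s.length - 1 := by omega
          subst this; omega
      · intro u hu heq
        obtain ⟨j, hj, rfl⟩ := List.mem_iff_getElem.mp hu
        rw [habs (s.length - 1) hlast, habs j hj, if_pos (by omega), if_pos (by omega)] at heq
        rcases Nat.lt_or_ge j (s.length - 1) with h | h
        · have := hpg j (s.length - 1) hj hlast h; omega
        · have : j = s.length - 1 := by omega
          subst this; exact le_refl _
    · -- x lies between s[L-1] < x ≤ s[L]: only those two can be nearest
      rw [if_neg hLlen]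
      have hL1 : L - 1 < s.length := by omega
      have hLl : L < s.length := by omega
      have hga : s.getD (L - 1) 0 = s[L - 1] := List.getD_eq_getElem s 0 hL1
      have hgb : s.getD L 0 = s[L] := List.getD_eq_getElem s 0 hLl
      rw [hga, hgb]
      have hax : s[L - 1] < x := h3 (L - 1) hL1 (by omega) (by omega)
      have hbx : x ≤ s[L] := h4 L hLl (by omega) hLl
      have hjlt : ∀ (j : Nat) (hj : j < s.length), j < L - 1 → s[j] < s[L - 1] :=
        fun j hj h => hpg j (L - 1) hj hL1 h
      have hjgt : ∀ (j : Nat) (hj : j < s.length), L < j → s[L] < s[j] :=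
        fun j hj h => hpg L j hLl hj h
      have habsa : |s[L - 1] - x| = x - s[L - 1] := by
        rw [habs (L - 1) hL1, if_pos (by omega)]
      have habsb : |s[L] - x| = s[L] - x := by
        rw [habs L hLl, if_neg (by omega)]
      by_cases hcab : x - s[L - 1] < s[L] - x
      · rw [if_pos hcab]
        refine ⟨List.getElem_mem hL1, ?_, ?_⟩
        · intro u hu
          obtain ⟨j, hj, rfl⟩ := List.mem_iff_getElem.mp hu
          rw [habsa, habs j hj]
          split_ifs with hjL
          · rcases Nat.lt_or_ge j (L - 1) with h | h
            · have := hjlt j hj h; omega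
            · have : j = L - 1 := by omega
              subst this; omega
          · rcases Nat.lt_or_ge L j with h | h
            · have := hjgt j hj h; omega
            · have : j = L := by omega
              subst this; omega
        · intro u hu heq
          obtain ⟨j, hj, rfl⟩ := List.mem_iff_getElem.mp hu
          rw [habsa, habs j hj] at heq
          split_ifs at heq with hjL
          · rcases Nat.lt_or_ge j (L - 1) with h | h
            · have := hjlt j hj h; omega
            · have : j = L - 1 := by omega
              subst this; exact le_refl _
          · rcases Nat.lt_or_ge L j with h | h
            · have := hjgt j hj h; omega
            · have : j = L := by omega
              subst this; omega
      · rw [if_neg hcab]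
        by_cases hcba : s[L] - x < x - s[L - 1]
        · rw [if_pos hcba]
          refine ⟨List.getElem_mem hLl, ?_, ?_⟩
          · intro u hu
            obtain ⟨j, hj, rfl⟩ := List.mem_iff_getElem.mp hu
            rw [habsb, habs j hj]
            split_ifs with hjL
            · rcases Nat.lt_or_ge j (L - 1) with h | h
              · have := hjlt j hj h; omega
              · have : j = L - 1 := by omega
                subst this; omega
            · rcases Nat.lt_or_ge L j with h | h
              · have := hjgt j hj h; omega
              · have : j = L := by omega
                subst this; omega
          · intro u hu heq
            obtain ⟨j, hj, rfl⟩ := List.mem_iff_getElem.mp hu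
            rw [habsb, habs j hj] at heq
            split_ifs at heq with hjL
            · rcases Nat.lt_or_ge j (L - 1) with h | h
              · have := hjlt j hj h; omega
              · have : j = L - 1 := by omega
                subst this; omega
            · rcases Nat.lt_or_ge L j with h | h
              · have := hjgt j hj h; omega
              · have : j = L := by omega
                subst this; exact le_refl _
        · -- exact distance tie between the two neighbours: first occurrence wins
          rw [if_neg hcba]
          have htie : x - s[L - 1] = s[L] - x := by omega
          have hda : d.getD s[L - 1] 0 = f s[L - 1] := hd _ (List.getElem_mem hL1)
          have hdb : d.getD s[L] 0 = f s[L] := hd _ (List.getElem_mem hLl)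
          rw [hda, hdb]
          by_cases hf : f s[L - 1] < f s[L]
          · rw [if_pos hf]
            refine ⟨List.getElem_mem hL1, ?_, ?_⟩
            · intro u hu
              obtain ⟨j, hj, rfl⟩ := List.mem_iff_getElem.mp hu
              rw [habsa, habs j hj]
              split_ifs with hjL
              · rcases Nat.lt_or_ge j (L - 1) with h | h
                · have := hjlt j hj h; omega
                · have : j = L - 1 := by omega
                  subst this; omega
              · rcases Nat.lt_or_ge L j with h | h
                · have := hjgt j hj h; omega
                · have : j = L := by omega
                  subst this; omega
            · intro u hu heq
              obtain ⟨j, hj, rfl⟩ := List.mem_iff_getElem.mp hu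
              rw [habsa, habs j hj] at heq
              split_ifs at heq with hjL
              · rcases Nat.lt_or_ge j (L - 1) with h | h
                · have := hjlt j hj h; omega
                · have : j = L - 1 := by omega
                  subst this; exact le_refl _
              · rcases Nat.lt_or_ge L j with h | h
                · have := hjgt j hj h; omega
                · have : j = L := by omega
                  subst this; exact le_of_lt hf
          · rw [if_neg hf]
            refine ⟨List.getElem_mem hLl, ?_, ?_⟩
            · intro u hu
              obtain ⟨j, hj, rfl⟩ := List.mem_iff_getElem.mp hu
              rw [habsb, habs j hj]
              split_ifs with hjL
              · rcases Nat.lt_or_ge j (L - 1) with h | h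
                · have := hjlt j hj h; omega
                · have : j = L - 1 := by omega
                  subst this; omega
              · rcases Nat.lt_or_ge L j with h | h
                · have := hjgt j hj h; omega
                · have : j = L := by omega
                  subst this; omega
            · intro u hu heq
              obtain ⟨j, hj, rfl⟩ := List.mem_iff_getElem.mp hu
              rw [habsb, habs j hj] at heq
              split_ifs at heq with hjL
              · rcases Nat.lt_or_ge j (L - 1) with h | h
                · have := hjlt j hj h; omega
                · have : j = L - 1 := by omega
                  subst this; exact le_of_not_gt hf
              · rcases Nat.lt_or_ge L j with h | h
                · have := hjgt j hj h; omega
                · have : j = L := by omega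
                  subst this; exact le_refl _

-- per data value: A's first minimum of min(centers, key=abs) IS B's binary-search pick
theorem pv_elem (centers : List Int) (hne : centers ≠ []) (x : Int) :
    (PySem.List.min? centers (fun c => |c - x|)).getD 0 =
      pvBest
        (PySem.List.sorted
          ((PySem.List.enumerate centers 0).foldl pvFirstStep PySem.Dict.empty).keys
          (fun v => v))
        ((PySem.List.enumerate centers 0).foldl pvFirstStep PySem.Dict.empty) x := by
  set F := (PySem.List.enumerate centers 0).foldl pvFirstStep PySem.Dict.empty with hF
  set s := PySem.List.sorted F.keys (fun v => v) with hsdef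
  have hkeysmem : ∀ v : Int, v ∈ F.keys ↔ v ∈ centers := by
    intro v
    rw [hF, pv_mem_keys_first, PySem.Dict.keys_empty, PySem.List.map_snd_enumerate]
    simp
  have hnodupK : F.keys.Nodup := pv_nodup_keys_first _ _ PySem.Dict.nodup_keys_empty
  have hsmem : ∀ v : Int, v ∈ s ↔ v ∈ centers := by
    intro v; rw [hsdef, PySem.List.mem_sorted]; exact hkeysmem v
  have hnodups : s.Nodup := ((PySem.List.sorted_perm F.keys (fun v => v) false).symm).nodup hnodupK
  have hpairle : s.Pairwise (fun a b => a ≤ b) := PySem.List.sorted_pairwise F.keys (fun v => v)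
  have hpair : s.Pairwise (· < ·) :=
    (hpairle.and hnodups).imp (fun h => lt_of_le_of_ne h.1 h.2)
  have hsne : s ≠ [] := by
    rcases List.exists_mem_of_ne_nil centers hne with ⟨c, hc⟩
    intro h
    rw [h] at hsmem
    exact absurd ((hsmem c).mpr hc) (List.not_mem_nil)
  have hd : ∀ v ∈ s, F.getD v 0 = (centers.idxOf v : Int) := by
    intro v hv
    rw [hF, pv_first_getD, if_neg (by simp [PySem.Dict.contains_empty]),
      if_pos ((hsmem v).mp hv)]
    ring
  rcases hmo : PySem.List.min? centers (fun c => |c - x|) with _ | m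
  · exact absurd ((PySem.List.min?_eq_none_iff centers _).mp hmo) hne
  · simp only [Option.getD_some]
    have hmmem := PySem.List.min?_mem hmo
    have hmin := PySem.List.min?_isMin hmo
    have htie := pv_min?_first_idx (fun c => |c - x|) centers m hmo
    obtain ⟨hbmem, hbmin, hbtie⟩ :=
      pv_best_spec s F x (fun v => (centers.idxOf v : Int)) hpair hsne hd
    set best := pvBest s F x with hbest
    have hbc : best ∈ centers := (hsmem best).mp hbmem
    have hms : m ∈ s := (hsmem m).mpr hmmem
    have hkey : |best - x| = |m - x| := le_antisymm (hbmin m hms) (hmin best hbc)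
    have h1 : centers.idxOf m ≤ centers.idxOf best := htie best hbc hkey
    have h2 : (centers.idxOf best : Int) ≤ (centers.idxOf m : Int) := hbtie m hms hkey.symm
    have hidx : centers.idxOf m = centers.idxOf best := le_antisymm h1 (by exact_mod_cast h2)
    have hmlt : centers.idxOf m < centers.length := List.idxOf_lt_length_of_mem hmmem
    have hblt : centers.idxOf best < centers.length := List.idxOf_lt_length_of_mem hbc
    calc m = centers[centers.idxOf m]'hmlt := (List.getElem_idxOf hmlt).symm
      _ = centers[centers.idxOf best]'hblt := by congr 1
      _ = best := List.getElem_idxOf hblt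

-- ===== VERDICT (by name: the statement is the Claim_ definition above) =====
theorem group_data_by_centers_spec : Claim_equal_group_data_by_centers := by
  intro data centers _ hpre
  unfold Spec_group_data_by_centers group_data_by_centers group_data_by_centers_alt
  rw [pv_fl_split]
  simp only [PySem.List.foldl_append_singleton_eq_map, List.nil_append]
  apply List.map_congr_left
  intro xi _
  rw [pv_elem centers hpre xi]
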